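-- pv_equiv track=rewrite | github.com/mat3sj/ufoshop | ufo_shop/models.py | _convert_to_iban
-- ===== SOURCE A (Python) =====
-- def _convert_to_iban(account_number):
--     """
--     Convert Czech bank account number to IBAN format
--     Format: CZ + check digits + bank code (4 digits) + account number (up to 16 digits)
--     """
--     # Split account number into parts
--     parts = account_number.split('/')
--     if len(parts) != 2:
--         # If the format is not as expected, return the original account number
--         return account_number
--
--     account_prefix_number, bank_code = parts
--
--     # Remove any hyphens from the account number
--     account_prefix_number = account_prefix_number.replace('-', '')
--
--     # Pad the account number with leading zeros to make it 16 digits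
--     account_number_padded = account_prefix_number.zfill(16)
--
--     # Prepare the IBAN without check digits
--     # For Czech Republic, the BBAN (Basic Bank Account Number) is bank_code + account_number_padded
--     bban = f"{bank_code}{account_number_padded}"
--
--     # Rearrange the country code and add '00' as placeholder for check digits
--     # Convert letters to numbers: A=10, B=11, ..., Z=35
--     # For 'CZ', C=12, Z=35
--     rearranged = f"{bban}123500"  # 'CZ' converted to digits (12, 35) + '00'
--
--     # Calculate the check digits using mod-97
--     # Since the number might be too large for int conversion, we'll calculate mod-97 in chunks
--     remainder = 0
--     for i in range(0, len(rearranged), 6):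
--         chunk = rearranged[i:i+6]
--         remainder = (remainder * 10**len(chunk) + int(chunk)) % 97
--
--     # Calculate the check digits
--     check_digits = str(98 - remainder).zfill(2)
--
--     # Construct the final IBAN
--     iban = f"CZ{check_digits}{bban}"
--
--     return iban
-- ===== SOURCE B (Python) =====
-- def _convert_to_iban(account_number):
--     parts = account_number.split('/')
--     if len(parts) != 2:
--         return account_number
--     prefix, bank_code = parts
--     digits = prefix.replace('-', '')
--     bban = bank_code + '0' * (16 - len(digits)) + digits
--     # streaming per-character Horner reduction mod 97: no big-integer parse at all
--     r = 0
--     for ch in bban + '123500':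
--         r = (r * 10 + ord(ch) - 48) % 97
--     check = 98 - r
--     return 'CZ' + ('0' + str(check) if check < 10 else str(check)) + bban
-- ===== Notes on version B (the rewrite author's own statement) =====
-- stated objective: simpler
-- what changed: A's chunked slice-and-int() mod-97 loop and zfill padding are replaced by a single per-character Horner reduction mod 97 (ord(ch)-48, no integer parsing at all) with explicit zero padding and explicit two-digit check formatting.
-- outside the precondition, e.g. on _convert_to_iban('    12/'): A returns 'CZ460000000000    12', B returns 'CZ340000000000    12'; on _convert_to_iban('779/-3615'): A returns 'CZ66-36150000000000000779', B returns 'CZ23-36150000000000000779'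
import Mathlib
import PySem

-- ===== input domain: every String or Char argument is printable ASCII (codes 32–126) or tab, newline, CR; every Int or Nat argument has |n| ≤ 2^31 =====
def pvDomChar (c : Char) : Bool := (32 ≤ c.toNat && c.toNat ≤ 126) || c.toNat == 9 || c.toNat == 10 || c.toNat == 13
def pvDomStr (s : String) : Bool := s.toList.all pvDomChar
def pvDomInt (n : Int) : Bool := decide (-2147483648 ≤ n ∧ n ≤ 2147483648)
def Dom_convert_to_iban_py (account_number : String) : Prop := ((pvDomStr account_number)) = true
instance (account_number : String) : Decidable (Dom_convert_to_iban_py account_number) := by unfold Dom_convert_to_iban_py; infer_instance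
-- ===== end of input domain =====

-- B drops A's chunked slice-and-int() mod-97 loop and zfill calls for a single per-character
-- Horner reduction mod 97 with explicit zero-padding and explicit two-digit check formatting (simpler).

-- Hand port of Python's int(s), exact on NON-EMPTY ALL-DIGIT strings — the only strings
-- A ever passes to int() on inputs admitted by Pre_convert_to_iban_py.
def pvIntOfDigits (cs : List Char) : Int :=
  cs.foldl (fun a c => a * 10 + ((c.toNat : Int) - 48)) 0

-- ===== PORT A =====
def convert_to_iban_py (account_number : String) : String :=
  let parts := PySem.Chars.splitOn account_number.toList ['/']
  if parts.length ≠ 2 then account_number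
  else
    let account_prefix_number := parts.getD 0 []
    let bank_code := parts.getD 1 []
    let account_prefix_number := PySem.Chars.replace account_prefix_number ['-'] []
    let account_number_padded := PySem.Chars.zfill account_prefix_number 16
    let bban := bank_code ++ account_number_padded
    let rearranged := bban ++ ['1', '2', '3', '5', '0', '0']
    let remainder := (PySem.List.pyRange 0 (rearranged.length : Int) 6).foldl
      (fun remainder i =>
        PySem.Int.mod
          (remainder * 10 ^ (PySem.List.slice rearranged (some i) (some (i + 6))).length +
            pvIntOfDigits (PySem.List.slice rearranged (some i) (some (i + 6)))) 97) 0
    let check_digits := PySem.Chars.zfill (PySem.Int.toChars (98 - remainder)) 2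
    String.ofList ('C' :: 'Z' :: (check_digits ++ bban))

-- ===== PORT B =====
def convert_to_iban_py_alt (account_number : String) : String :=
  let parts := PySem.Chars.splitOn account_number.toList ['/']
  if parts.length ≠ 2 then account_number
  else
    let pref := parts.getD 0 []
    let bank_code := parts.getD 1 []
    let digits := PySem.Chars.replace pref ['-'] []
    let bban := bank_code ++ (List.replicate (16 - digits.length) '0' ++ digits)
    -- streaming per-character Horner reduction mod 97 (no integer parse)
    let r := (bban ++ ['1', '2', '3', '5', '0', '0']).foldl
      (fun r c => PySem.Int.mod (r * 10 + ((c.toNat : Int) - 48)) 97) 0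
    let check := 98 - r
    String.ofList ('C' :: 'Z' ::
      ((if check < 10 then '0' :: PySem.Int.toChars check else PySem.Int.toChars check) ++ bban))

-- ===== PRECONDITION & SPEC =====
-- Pre_ excludes the one-'/' inputs whose hyphen-stripped prefix or bank code is not all digits:
-- there A's chunked int() calls either raise ValueError or (when whitespace/sign characters
-- happen to parse chunk-wise, e.g. '    12/' or '779/-3615') return an accidental chunk-dependent
-- value that no exact re-implementation of the IBAN computation reproduces.
def Pre_convert_to_iban_py (account_number : String) : Prop :=
  let parts := PySem.Chars.splitOn account_number.toList ['/']
  parts.length ≠ 2 ∨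
    ((PySem.Chars.replace (parts.getD 0 []) ['-'] []).all PySem.Chars.isdigit = true ∧
     (parts.getD 1 []).all PySem.Chars.isdigit = true)
instance (account_number : String) : Decidable (Pre_convert_to_iban_py account_number) := by
  unfold Pre_convert_to_iban_py; infer_instance

def pvWitness_convert_to_iban_py : String := "19-2000145399/0800"

def Spec_convert_to_iban_py (account_number : String) (out : String) : Prop := out = convert_to_iban_py_alt account_number
instance (account_number : String) (out : String) : Decidable (Spec_convert_to_iban_py account_number out) := by unfold Spec_convert_to_iban_py; infer_instance

-- ===== CLAIM (what is proved, stated in full; the proofs are below) =====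
def Claim_equal_convert_to_iban_py : Prop := ∀ (account_number : String), Dom_convert_to_iban_py account_number → Pre_convert_to_iban_py account_number → Spec_convert_to_iban_py account_number (convert_to_iban_py account_number)

-- ===== LEMMAS AND PROOFS =====

-- Folding digits from an arbitrary accumulator = accumulator shifted past the whole list.
lemma pvIntOfDigits_foldl (cs : List Char) (a : Int) :
    cs.foldl (fun a c => a * 10 + ((c.toNat : Int) - 48)) a
      = a * 10 ^ cs.length + pvIntOfDigits cs := by
  induction cs generalizing a with
  | nil => simp [pvIntOfDigits]
  | cons c cs ih =>
    simp only [List.foldl_cons, List.length_cons, pvIntOfDigits]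
    rw [ih, ih (0 * 10 + ((c.toNat : Int) - 48))]
    ring

lemma pvIntOfDigits_append (xs ys : List Char) :
    pvIntOfDigits (xs ++ ys) = pvIntOfDigits xs * 10 ^ ys.length + pvIntOfDigits ys := by
  unfold pvIntOfDigits
  rw [List.foldl_append, pvIntOfDigits_foldl]
  rfl

-- The invariant of A's chunk loop: after k chunks the state is (value of the first 6*k chars) % 97.
lemma pvChunkInvariant (cs : List Char) (K : Nat) :
    ((List.range K).map (fun k : Nat => (0 : Int) + 6 * (k : Int))).foldl
      (fun remainder i =>
        PySem.Int.mod
          (remainder * 10 ^ (PySem.List.slice cs (some i) (some (i + 6))).length +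
            pvIntOfDigits (PySem.List.slice cs (some i) (some (i + 6)))) 97) 0
      = PySem.Int.mod (pvIntOfDigits (cs.take (6 * K))) 97 := by
  induction K with
  | zero =>
    simp only [List.range_zero, List.map_nil, List.foldl_nil, Nat.mul_zero, List.take_zero]
    simp [pvIntOfDigits]
  | succ K ih =>
    rw [List.range_succ, List.map_append, List.foldl_append, ih]
    simp only [List.map_cons, List.map_nil, List.foldl_cons, List.foldl_nil, zero_add]
    have h6 : ((6 : Int) * (K : Int)) = ((6 * K : Nat) : Int) := by push_cast; ring
    have h66 : (((6 * K : Nat) : Int) + 6) = ((6 * K + 6 : Nat) : Int) := by push_cast; ring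
    rw [h6, h66, PySem.List.slice_natCast cs (6 * K) (6 * K + 6)]
    have htake : cs.take (6 * (K + 1)) = cs.take (6 * K) ++ (cs.drop (6 * K)).take 6 := by
      have : 6 * (K + 1) = 6 * K + 6 := by ring
      rw [this, List.take_add]
    have h2 : 6 * K + 6 - 6 * K = 6 := by omega
    rw [h2, htake, pvIntOfDigits_append]
    simp only [PySem.Int.mod_eq_emod_of_pos (by norm_num : (0:Int) < 97)]
    conv_lhs => rw [Int.add_emod, Int.mul_emod, Int.emod_emod_of_dvd _ (dvd_refl 97)]
    conv_rhs => rw [Int.add_emod, Int.mul_emod]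

-- A's whole chunked mod-97 loop computes the value of the string mod 97 directly.
lemma pvChunkLoop (cs : List Char) :
    (PySem.List.pyRange 0 (cs.length : Int) 6).foldl
      (fun remainder i =>
        PySem.Int.mod
          (remainder * 10 ^ (PySem.List.slice cs (some i) (some (i + 6))).length +
            pvIntOfDigits (PySem.List.slice cs (some i) (some (i + 6)))) 97) 0
      = PySem.Int.mod (pvIntOfDigits cs) 97 := by
  rw [PySem.List.pyRange_of_pos 0 (cs.length : Int) (by norm_num : (0:Int) < 6)]
  by_cases h : (0 : Int) < (cs.length : Int)
  · rw [if_pos h]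
    have hcalc : (((cs.length : Int) - 0 + 6 - 1) / 6).toNat = (cs.length + 5) / 6 := by
      have : ((cs.length : Int) - 0 + 6 - 1) = ((cs.length + 5 : Nat) : Int) := by push_cast; ring
      rw [this]
      rw [show ((6:Int)) = ((6 : Nat) : Int) from rfl, ← Int.natCast_div, Int.toNat_natCast]
    rw [hcalc, pvChunkInvariant]
    have : cs.take (6 * ((cs.length + 5) / 6)) = cs := List.take_of_length_le (by omega)
    rw [this]
  · rw [if_neg h]
    have : cs = [] := by
      cases cs with
      | nil => rfl
      | cons c cs => exfalso; apply h; simp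
    subst this
    simp [pvIntOfDigits]

-- B's per-character Horner loop from a reduced accumulator.
lemma pvHornerFoldl (cs : List Char) (a : Int) :
    cs.foldl (fun r c => PySem.Int.mod (r * 10 + ((c.toNat : Int) - 48)) 97) (PySem.Int.mod a 97)
      = PySem.Int.mod (a * 10 ^ cs.length + pvIntOfDigits cs) 97 := by
  induction cs generalizing a with
  | nil => simp [pvIntOfDigits]
  | cons c cs ih =>
    simp only [List.foldl_cons, List.length_cons]
    have hmod : PySem.Int.mod (PySem.Int.mod a 97 * 10 + ((c.toNat : Int) - 48)) 97
        = PySem.Int.mod (a * 10 + ((c.toNat : Int) - 48)) 97 := by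
      simp only [PySem.Int.mod_eq_emod_of_pos (by norm_num : (0:Int) < 97)]
      conv_lhs => rw [Int.add_emod, Int.mul_emod, Int.emod_emod_of_dvd _ (dvd_refl 97)]
      conv_rhs => rw [Int.add_emod, Int.mul_emod]
    rw [hmod, ih]
    have hpv : pvIntOfDigits (c :: cs)
        = ((c.toNat : Int) - 48) * 10 ^ cs.length + pvIntOfDigits cs := by
      calc pvIntOfDigits (c :: cs)
          = cs.foldl (fun a c => a * 10 + ((c.toNat : Int) - 48))
              (0 * 10 + ((c.toNat : Int) - 48)) := rfl
        _ = (0 * 10 + ((c.toNat : Int) - 48)) * 10 ^ cs.length + pvIntOfDigits cs :=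
            pvIntOfDigits_foldl cs _
        _ = ((c.toNat : Int) - 48) * 10 ^ cs.length + pvIntOfDigits cs := by ring
    rw [hpv]
    congr 1
    ring
-- B's whole Horner loop computes the value of the string mod 97.
lemma pvHornerLoop (cs : List Char) :
    cs.foldl (fun r c => PySem.Int.mod (r * 10 + ((c.toNat : Int) - 48)) 97) 0
      = PySem.Int.mod (pvIntOfDigits cs) 97 := by
  have h := pvHornerFoldl cs 0
  simpa using h

-- zfill of a pure digit string is plain left-padding with zeros.
lemma pvZfillDigits (cs : List Char) (h : cs.all PySem.Chars.isdigit = true) :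
    PySem.Chars.zfill cs 16 = List.replicate (16 - cs.length) '0' ++ cs := by
  unfold PySem.Chars.zfill
  by_cases hle : (16 : Int) ≤ (cs.length : Int)
  · rw [if_pos hle]
    have : 16 - cs.length = 0 := by omega
    simp [this]
  · rw [if_neg hle]
    cases cs with
    | nil => simp
    | cons c rest =>
      have hc : PySem.Chars.isdigit c = true := by
        simp only [List.all_cons, Bool.and_eq_true] at h; exact h.1
      have hns : ¬(c = '+' ∨ c = '-') := by
        rintro (rfl | rfl) <;> simp_all <;> revert hc <;> decide
      simp only [if_neg hns]
      simp

-- The two-digit check formatting: zfill(str(n),2) for 2 ≤ n ≤ 98.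
lemma pvCheckFmt (r : Int) (h0 : 0 ≤ r) (h1 : r < 97) :
    PySem.Chars.zfill (PySem.Int.toChars (98 - r)) 2
      = (if 98 - r < 10 then '0' :: PySem.Int.toChars (98 - r)
         else PySem.Int.toChars (98 - r)) := by
  interval_cases r <;> decide

-- ===== VERDICT (by name: the statement is the Claim_ definition above) =====
theorem convert_to_iban_py_spec : Claim_equal_convert_to_iban_py := by
  intro account_number _hdom hpre
  unfold Spec_convert_to_iban_py convert_to_iban_py convert_to_iban_py_alt
  by_cases h : (PySem.Chars.splitOn account_number.toList ['/']).length ≠ 2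
  · simp only [if_pos h]
  · simp only [h]
    unfold Pre_convert_to_iban_py at hpre
    simp only [h, false_or] at hpre
    rw [pvZfillDigits _ hpre.1, pvChunkLoop, pvHornerLoop,
      pvCheckFmt _ (PySem.Int.mod_nonneg _ (by norm_num))
        (PySem.Int.mod_lt _ (by norm_num))]
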